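-- pv_equiv track=rewrite | github.com/Deceptrax123/Cryptography-Lab | IDEA/idea.py | string_to_blocks
-- ===== SOURCE A (Python) =====
-- def string_to_blocks(text):
--     byte_array = text.encode('utf-8')
--
--     padding_len = (8 - len(byte_array) % 8) % 8
--     byte_array += b'\x00' * padding_len
--
--     blocks = []
--     for i in range(0, len(byte_array), 8):
--         block = int.from_bytes(byte_array[i:i+8], byteorder='big')
--         blocks.append(block)
--
--     return blocks, padding_len
-- ===== SOURCE B (Python) =====
-- def string_to_blocks(text):
--     byte_array = text.encode('utf-8')
--     padding_len = (8 - len(byte_array) % 8) % 8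
--     byte_array += b'\x00' * padding_len
--     # single pass over the bytes, accumulating each 64-bit block byte by byte
--     # and flushing it every 8 bytes -- no slicing, no per-chunk int.from_bytes
--     blocks = []
--     acc = 0
--     cnt = 0
--     for byte in byte_array:
--         acc = acc * 256 + byte
--         cnt = cnt + 1
--         if cnt == 8:
--             blocks.append(acc)
--             acc = 0
--             cnt = 0
--     return blocks, padding_len
-- ===== Notes on version B (the rewrite author's own statement) =====
-- stated objective: alternative
-- what changed: Instead of stepping an index by 8 and converting each 8-byte slice with int.from_bytes, B makes a single byte-by-byte pass over the padded bytes, accumulating each 64-bit block with acc = acc*256 + byte and flushing it every 8 bytes via a counter.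
import Mathlib
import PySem

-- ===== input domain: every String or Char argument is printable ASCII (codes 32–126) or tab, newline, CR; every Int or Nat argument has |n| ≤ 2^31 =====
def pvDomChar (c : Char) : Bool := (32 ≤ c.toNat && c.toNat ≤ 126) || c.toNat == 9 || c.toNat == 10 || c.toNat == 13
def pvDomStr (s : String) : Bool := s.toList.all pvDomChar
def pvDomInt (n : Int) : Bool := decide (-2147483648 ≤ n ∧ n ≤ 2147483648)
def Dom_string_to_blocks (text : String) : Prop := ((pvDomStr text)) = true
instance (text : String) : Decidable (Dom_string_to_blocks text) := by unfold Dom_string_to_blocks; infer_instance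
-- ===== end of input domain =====

-- B replaces A's per-chunk slicing + int.from_bytes by a single byte-by-byte pass that
-- accumulates each 64-bit block and flushes it every 8 bytes (objective: alternative).

-- int.from_bytes(bs, 'big') for a list of byte values (exact for byte values 0..255)
def pyFromBytesBE (bs : List Int) : Int := bs.foldl (fun a b => a * 256 + b) 0

-- ===== PORT A =====
def string_to_blocks (text : String) : List Int × Int :=
  -- text.encode('utf-8'): on the ASCII domain each char is one byte = its code point
  let byte_array : List Int := text.toList.map (fun c => (c.toNat : Int))
  let padding_len : Int := PySem.Int.mod (8 - PySem.Int.mod (byte_array.length : Int) 8) 8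
  let byte_array := byte_array ++ List.replicate padding_len.toNat 0
  let blocks := (PySem.List.pyRange 0 (byte_array.length : Int) 8).foldl
    (fun blocks i => blocks ++ [pyFromBytesBE (PySem.List.slice byte_array (some i) (some (i + 8)))]) []
  (blocks, padding_len)

-- ===== PORT B =====
def string_to_blocks_alt (text : String) : List Int × Int :=
  let byte_array : List Int := text.toList.map (fun c => (c.toNat : Int))
  let padding_len : Int := PySem.Int.mod (8 - PySem.Int.mod (byte_array.length : Int) 8) 8
  let byte_array := byte_array ++ List.replicate padding_len.toNat 0
  let st := byte_array.foldl
    (fun (st : List Int × Int × Int) byte =>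
      let acc := st.2.1 * 256 + byte
      let cnt := st.2.2 + 1
      if cnt = 8 then (st.1 ++ [acc], 0, 0) else (st.1, acc, cnt))
    ([], 0, 0)
  (st.1, padding_len)

-- ===== PRECONDITION & SPEC =====
def Spec_string_to_blocks (text : String) (out : List Int × Int) : Prop := out = string_to_blocks_alt text
instance (text : String) (out : List Int × Int) : Decidable (Spec_string_to_blocks text out) := by unfold Spec_string_to_blocks; infer_instance

-- ===== CLAIM (what is proved, stated in full; the proofs are below) =====
def Claim_equal_string_to_blocks : Prop := ∀ (text : String), Dom_string_to_blocks text → Spec_string_to_blocks text (string_to_blocks text)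

-- ===== LEMMAS AND PROOFS =====

-- big-endian 8-byte chunks, most significant first (reference shape for both sides)
def chunksBE : Nat → List Int → List Int
  | 0, _ => []
  | k + 1, L => pyFromBytesBE (L.take 8) :: chunksBE k (L.drop 8)

lemma foldl_snoc_map (g : Int → Int) (l : List Int) : ∀ (acc : List Int),
    l.foldl (fun bs i => bs ++ [g i]) acc = acc ++ l.map g := by
  induction l with
  | nil => simp
  | cons x l ih => intro acc; simp [ih]

lemma map_range_eq_chunks : ∀ (k : Nat) (L : List Int),
    (List.range k).map (fun j => pyFromBytesBE ((L.drop (8 * j)).take 8)) = chunksBE k L := by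
  intro k
  induction k with
  | zero => intro L; simp [chunksBE]
  | succ k ih =>
    intro L
    rw [List.range_succ_eq_map]
    simp only [List.map_cons, List.map_map]
    unfold chunksBE
    refine congrArg₂ List.cons ?_ ?_
    · norm_num
    · rw [← ih (L.drop 8)]
      apply List.map_congr_left
      intro j _
      simp only [Function.comp]
      congr 2
      rw [List.drop_drop]
      congr 1
      omega

-- B's accumulator: folding one full chunk from counter 8 - |C| flushes exactly once
lemma chunk_flush : ∀ (C : List Int), C.length ≠ 0 → C.length ≤ 8 → ∀ (bs : List Int) (a : Int),
    C.foldl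
      (fun (st : List Int × Int × Int) byte =>
        let acc := st.2.1 * 256 + byte
        let cnt := st.2.2 + 1
        if cnt = 8 then (st.1 ++ [acc], 0, 0) else (st.1, acc, cnt))
      (bs, a, 8 - (C.length : Int))
      = (bs ++ [C.foldl (fun a b => a * 256 + b) a], 0, 0) := by
  intro C
  induction C with
  | nil => intro h; exact absurd rfl h
  | cons b C ih =>
    intro _ hle bs a
    simp only [List.foldl_cons, List.length_cons]
    by_cases hC : C.length = 0
    · have : C = [] := List.eq_nil_of_length_eq_zero hC
      subst this
      norm_num
    · have hne : (8 : Int) - ((C.length : Nat) + 1 : Nat) + 1 ≠ 8 := by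
        have : 0 < C.length := Nat.pos_of_ne_zero hC
        push_cast
        omega
      rw [if_neg hne]
      have harg : (8 : Int) - ((C.length : Nat) + 1 : Nat) + 1 = 8 - (C.length : Int) := by
        push_cast; ring
      rw [harg]
      exact ih hC (by simp at hle; omega) bs (a * 256 + b)

lemma fold_bytes_chunks : ∀ (k : Nat) (L : List Int), L.length = 8 * k → ∀ (bs : List Int),
    L.foldl
      (fun (st : List Int × Int × Int) byte =>
        let acc := st.2.1 * 256 + byte
        let cnt := st.2.2 + 1
        if cnt = 8 then (st.1 ++ [acc], 0, 0) else (st.1, acc, cnt))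
      (bs, 0, 0)
      = (bs ++ chunksBE k L, 0, 0) := by
  intro k
  induction k with
  | zero =>
    intro L hL bs
    have : L = [] := List.eq_nil_of_length_eq_zero (by omega)
    subst this
    simp [chunksBE]
  | succ k ih =>
    intro L hL bs
    have hsplit : L = L.take 8 ++ L.drop 8 := (List.take_append_drop _ _).symm
    have htlen : (L.take 8).length = 8 := by simp; omega
    conv_lhs => rw [hsplit]
    rw [List.foldl_append]
    have h0 : (8 : Int) - ((L.take 8).length : Int) = 0 := by rw [htlen]; norm_num
    have hflush := chunk_flush (L.take 8) (by omega) (by omega) bs 0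
    rw [h0] at hflush
    rw [hflush, ih (L.drop 8) (by simp; omega) (bs ++ [(L.take 8).foldl (fun a b => a * 256 + b) 0])]
    have hstep : chunksBE (k + 1) L = pyFromBytesBE (L.take 8) :: chunksBE k (L.drop 8) := rfl
    rw [hstep]
    simp [pyFromBytesBE, List.append_assoc]

-- ===== VERDICT (by name: the statement is the Claim_ definition above) =====
theorem string_to_blocks_spec : Claim_equal_string_to_blocks := by
  intro text _
  unfold Spec_string_to_blocks
  simp only [string_to_blocks, string_to_blocks_alt]
  set m : Nat := (text.toList.map (fun c => (c.toNat : Int))).length with hm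
  set p : Int := PySem.Int.mod (8 - PySem.Int.mod (m : Int) 8) 8 with hpdef
  have hp : p = (8 - (m : Int) % 8) % 8 := by
    rw [hpdef, PySem.Int.mod_eq_emod_of_pos (by norm_num),
      PySem.Int.mod_eq_emod_of_pos (by norm_num)]
  set padded : List Int := text.toList.map (fun c => (c.toNat : Int)) ++ List.replicate p.toNat 0 with hpadded
  set k : Nat := (m + p.toNat) / 8 with hk
  have hlen : padded.length = 8 * k := by
    rw [hpadded]
    simp only [List.length_append, List.length_replicate, ← hm]
    rw [hp] at *
    omega
  -- A side: the slicing loop produces chunksBE k padded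
  have hA : (PySem.List.pyRange 0 (padded.length : Int) 8).foldl
      (fun blocks i => blocks ++ [pyFromBytesBE (PySem.List.slice padded (some i) (some (i + 8)))]) []
      = chunksBE k padded := by
    rw [foldl_snoc_map, hlen]
    rw [PySem.List.pyRange_of_pos 0 ((8 * k : Nat) : Int) (by norm_num)]
    have hN : (if (0:Int) < ((8 * k : Nat) : Int)
        then ((((8 * k : Nat) : Int) - 0 + 8 - 1) / 8).toNat else 0) = k := by
      split_ifs with h
      · push_cast at h ⊢; omega
      · push_cast at h; omega
    rw [hN, List.map_map]
    rw [← map_range_eq_chunks k padded]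
    apply List.map_congr_left
    intro j _
    simp only [Function.comp, zero_add]
    have hsl := PySem.List.slice_natCast_add padded (8 * j) 8
    push_cast at hsl
    rw [hsl]
  -- B side: the byte-accumulating pass produces chunksBE k padded as well
  have hB := fold_bytes_chunks k padded hlen []
  rw [hA, hB]
  simp
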